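-- pv_equiv track=rewrite | github.com/dinleo/CodeTest | PyCode/Programmers_Test/Mobis/1.py | solution
-- ===== SOURCE A (Python) =====
-- import itertools
--
-- def solution(dice):
--     nums = []
--     dice = [[str(j) for j in i] for i in dice]
--     com = []
--     for i in range(len(dice)+1):
--         com.extend(itertools.combinations(range(len(dice)),i))
--     for c in com:
--         arr = []
--         for cc in c:
--             arr.append(dice[int(cc)])
--         nums.extend(list(itertools.product(*arr)))
--
--     numbers = []
--     for n in nums:
--         numbers.extend(list(itertools.permutations(n,len(n))))
--     numbers.sort()
--     for i in range(10000):
--         if tuple(str(i)) not in numbers: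
--             return i
-- ===== SOURCE B (Python) =====
-- def solution(dice):
--     # One-to-one matching (SDR) per candidate instead of enumerating all
--     # subset/product/permutation tuples: a die supplies digit char c iff
--     # str(face) == c for some face.
--     face_sets = [{str(f) for f in d} for d in dice]
--
--     def match(chars, used):
--         if not chars:
--             return True
--         c = chars[0]
--         for j, s in enumerate(face_sets):
--             if j not in used and c in s and match(chars[1:], used | {j}):
--                 return True
--         return False
--
--     for i in range(10000):
--         if not match(list(str(i)), frozenset()):
--             return i
-- ===== Notes on version B (the rewrite author's own statement) =====
-- stated objective: faster
-- what changed: Instead of materialising every subset/product/permutation tuple of dice faces, sorting ~sum_k C(n,k)*6^k*k! tuples and scanning that list per candidate, B tests each candidate 0..9999 directly by a small backtracking one-to-one matching (SDR) of its digit characters to distinct dice, where a die supplies char c iff str(face)==c. (Pre_ excludes only dice reaching every candidate, where both Pythons fall off the loop and return None rather than an int.)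
import Mathlib
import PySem

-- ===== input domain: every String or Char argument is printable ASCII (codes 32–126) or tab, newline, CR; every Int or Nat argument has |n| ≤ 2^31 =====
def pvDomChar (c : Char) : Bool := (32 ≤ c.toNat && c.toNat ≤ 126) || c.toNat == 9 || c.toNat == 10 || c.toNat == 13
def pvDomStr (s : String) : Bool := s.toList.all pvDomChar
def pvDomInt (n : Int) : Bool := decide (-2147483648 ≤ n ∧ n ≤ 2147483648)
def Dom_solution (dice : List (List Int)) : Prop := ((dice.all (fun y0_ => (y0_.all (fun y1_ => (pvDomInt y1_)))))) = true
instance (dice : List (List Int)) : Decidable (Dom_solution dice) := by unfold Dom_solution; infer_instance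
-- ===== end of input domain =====

-- B replaces A's enumeration of every subset/product/permutation face tuple (then sort + scan per
-- candidate) by a per-candidate backtracking one-to-one matching of digit characters to distinct
-- dice: a different, faster algorithm with the same return value.
-- Both Pythons implicitly return None when every candidate 0..9999 is reachable; those inputs are
-- outside Pre_solution, and there both ports return 10000 (an arbitrary common stand-in for None).

-- ===== PORT A =====
-- str(i) as the list of its single-character strings (tuple(str(i)) in A, list(str(i)) in B)
def pyDigits (i : Int) : List String := (PySem.Int.toStr i).toList.map (fun c => String.ofList [c])

-- itertools.combinations(l, k): the length-k subsequences of l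
def combA {α : Type} : Nat → List α → List (List α)
  | 0, _ => [[]]
  | _ + 1, [] => []
  | k + 1, x :: xs => (combA k xs).map (x :: ·) ++ combA (k + 1) xs

-- itertools.product(*arr)
def prodA {α : Type} : List (List α) → List (List α)
  | [] => [[]]
  | l :: ls => l.flatMap (fun x => (prodA ls).map (x :: ·))

-- Python tuple-of-strings ≤ (the comparison used by numbers.sort())
def tupLe : List String → List String → Bool
  | [], _ => true
  | _ :: _, [] => false
  | a :: as, b :: bs => a < b || (a == b && tupLe as bs)

-- A's com / nums / numbers (dice already converted to face strings); the index cc taken from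
-- range n is always in range, so dice[int(cc)] is getD
def numbersA (ds : List (List String)) : List (List String) :=
  let n := ds.length
  let com := (List.range (n + 1)).flatMap (fun i => combA i (List.range n))
  let nums := com.flatMap (fun c => prodA (c.map (fun cc => ds.getD cc [])))
  (nums.flatMap (fun t => PySem.List.permutations t t.length)).mergeSort tupLe

def loopA (numbers : List (List String)) : List Nat → Int
  | [] => 10000   -- Python: implicit None (outside Pre_solution)
  | i :: rest => if pyDigits (i : Int) ∈ numbers then loopA numbers rest else (i : Int)

def solution (dice : List (List Int)) : Int :=
  loopA (numbersA (dice.map (fun d => d.map PySem.Int.toStr))) (List.range 10000)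

-- ===== PORT B =====
def faceSetsB (dice : List (List Int)) : List (PySem.Set String) :=
  dice.map (fun d => PySem.Set.ofList (d.map PySem.Int.toStr))

-- match(chars, used): backtracking one-to-one matching over enumerate(face_sets)
def matchB (fs : List (PySem.Set String)) : List String → PySem.Set Int → Bool
  | [], _ => true
  | c :: rest, used =>
      (PySem.List.enumerate fs 0).any (fun js =>
        !(PySem.Set.contains used js.1) && PySem.Set.contains js.2 c
          && matchB fs rest (PySem.Set.add used js.1))

def loopB (fs : List (PySem.Set String)) : List Nat → Int
  | [] => 10000   -- Python: implicit None (outside Pre_solution)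
  | i :: rest =>
      if !(matchB fs (pyDigits (i : Int)) PySem.Set.empty) then (i : Int) else loopB fs rest

def solution_alt (dice : List (List Int)) : Int :=
  loopB (faceSetsB dice) (List.range 10000)

-- ===== PRECONDITION & SPEC =====
-- Pre_ excludes exactly the inputs on which Python A (and B) falls off the final loop and returns
-- None — not an int — i.e. dice from which the digit tuple of every i in 0..9999 is reachable.
def Pre_solution (dice : List (List Int)) : Prop :=
  ∃ i ∈ List.range' 0 10000,
    ¬ ∃ f : Fin (pyDigits (i : Int)).length → Fin dice.length, Function.Injective f ∧
        ∀ k, (pyDigits (i : Int)).get k ∈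
          ((dice.map (fun dd => dd.map PySem.Int.toStr)).getD (f k) [])
instance (dice : List (List Int)) : Decidable (Pre_solution dice) := by
  unfold Pre_solution; infer_instance

def pvWitness_solution : List (List Int) := [[1, 2], [23]]

def Spec_solution (dice : List (List Int)) (out : Int) : Prop := out = solution_alt dice
instance (dice : List (List Int)) (out : Int) : Decidable (Spec_solution dice out) := by
  unfold Spec_solution; infer_instance

-- ===== CLAIM (what is proved, stated in full; the proofs are below) =====
def Claim_equal_solution : Prop :=
  ∀ (dice : List (List Int)), Dom_solution dice → Pre_solution dice →
    Spec_solution dice (solution dice)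

-- ===== LEMMAS AND PROOFS =====

theorem mem_combA {α : Type} (k : Nat) (l c : List α) :
    c ∈ combA k l ↔ c.Sublist l ∧ c.length = k := by
  induction l generalizing k c with
  | nil =>
      cases k with
      | zero => simp [combA]
      | succ k =>
          simp only [combA, List.not_mem_nil, false_iff, not_and]
          intro h
          simp [List.sublist_nil.mp h]
  | cons x xs ih =>
      cases k with
      | zero =>
          simp only [combA, List.mem_singleton]
          constructor
          · rintro rfl; simp
          · rintro ⟨h1, h2⟩; exact List.length_eq_zero_iff.mp h2
      | succ k =>
          simp only [combA, List.mem_append, List.mem_map, ih]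
          constructor
          · rintro (⟨a, ⟨h1, h2⟩, rfl⟩ | ⟨h1, h2⟩)
            · exact ⟨h1.cons_cons x, by simp [h2]⟩
            · exact ⟨h1.cons x, h2⟩
          · rintro ⟨h1, h2⟩
            cases c with
            | nil => simp at h2
            | cons a c =>
                rcases List.cons_sublist_cons'.mp h1 with h | ⟨rfl, h⟩
                · right; exact ⟨h, h2⟩
                · left; exact ⟨c, ⟨h, by simpa using h2⟩, rfl⟩

theorem mem_prodA {α : Type} (ls : List (List α)) (t : List α) :
    t ∈ prodA ls ↔ List.Forall₂ (fun x l => x ∈ l) t ls := by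
  induction ls generalizing t with
  | nil => simp [prodA, List.forall₂_nil_right_iff]
  | cons l ls ih =>
      simp only [prodA, List.mem_flatMap, List.mem_map]
      constructor
      · rintro ⟨x, hx, t', ht', rfl⟩
        exact List.Forall₂.cons hx (ih t' |>.mp ht')
      · intro h
        cases h with
        | cons hx ht => exact ⟨_, hx, _, (ih _).mpr ht, rfl⟩

theorem permB_succ {α : Type} (xs : List α) (r : Nat) :
    PySem.List.permutations xs (r + 1) =
      (List.range xs.length).flatMap (fun i =>
        match xs[i]? with
        | none => []
        | some x => (PySem.List.permutations (xs.eraseIdx i) r).map (fun p => x :: p)) := by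
  rw [PySem.List.permutations]; rfl

theorem mem_permutations_of_perm {α : Type} : ∀ (r : Nat) (xs p : List α),
    xs.length = r → p.Perm xs → p ∈ PySem.List.permutations xs r := by
  intro r
  induction r with
  | zero =>
      intro xs p hl hp
      rw [PySem.List.permutations]
      have : xs = [] := List.length_eq_zero_iff.mp hl
      subst this
      simp [List.perm_nil.mp hp]
  | succ r ih =>
      intro xs p hl hp
      rw [permB_succ]
      cases p with
      | nil => exact absurd (hp.length_eq) (by simp [hl])
      | cons a p' =>
          have ha : a ∈ xs := hp.mem_iff.mp (by simp)
          obtain ⟨i, hilt, hget⟩ := List.mem_iff_getElem.mp ha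
          have h2 : xs.Perm (a :: xs.eraseIdx i) := by
            have h3 := (List.getElem_cons_eraseIdx_perm hilt).symm
            rwa [hget] at h3
          have hperm : p'.Perm (xs.eraseIdx i) := (hp.trans h2).cons_inv
          have hlen : (xs.eraseIdx i).length = r := by
            rw [List.length_eraseIdx_of_lt hilt, hl]; rfl
          simp only [List.mem_flatMap, List.mem_range]
          refine ⟨i, hilt, ?_⟩
          have : xs[i]? = some a := by rw [List.getElem?_eq_getElem hilt, hget]
          rw [this]
          simp only [List.mem_map]
          exact ⟨p', ih _ _ hlen hperm, rfl⟩

theorem mem_permutations_iff {α : Type} (t p : List α) :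
    p ∈ PySem.List.permutations t t.length ↔ p.Perm t :=
  ⟨PySem.List.perm_of_mem_permutations, mem_permutations_of_perm t.length t p rfl⟩

theorem exists_forall₂_of_perm_left {α β : Type} {R : α → β → Prop} {p q : List α} {l : List β}
    (hpq : p.Perm q) (h : List.Forall₂ R q l) :
    ∃ l', l'.Perm l ∧ List.Forall₂ R p l' := by
  induction hpq generalizing l with
  | nil =>
      cases h
      exact ⟨[], List.Perm.refl _, List.Forall₂.nil⟩
  | cons x _ ih =>
      cases h with
      | cons hb ht =>
          obtain ⟨l', hl', hf⟩ := ih ht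
          exact ⟨_ :: l', hl'.cons _, hf.cons hb⟩
  | swap x y _ =>
      cases h with
      | cons h1 h2 =>
        cases h2 with
        | cons h3 h4 =>
            exact ⟨_ :: _ :: _, List.Perm.swap _ _ _, h4.cons h1 |>.cons h3⟩
  | trans _ _ ih1 ih2 =>
      obtain ⟨l1, hl1, hf1⟩ := ih2 h
      obtain ⟨l2, hl2, hf2⟩ := ih1 hf1
      exact ⟨l2, hl2.trans hl1, hf2⟩

theorem matchB_iff (fs : List (PySem.Set String)) (ds : List String) (used : PySem.Set Int) :
    matchB fs ds used = true ↔
      ∃ sel : List Nat, sel.Nodup ∧ (∀ k ∈ sel, ¬ ((k : Int) ∈ used)) ∧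
        List.Forall₂ (fun c k => k < fs.length ∧
          PySem.Set.contains (fs.getD k PySem.Set.empty) c = true) ds sel := by
  induction ds generalizing used with
  | nil =>
      simp only [matchB, true_iff]
      exact ⟨[], by simp, by simp, List.Forall₂.nil⟩
  | cons c rest ih =>
      simp only [matchB, List.any_eq_true]
      constructor
      · rintro ⟨⟨j, s⟩, hmem, hcond⟩
        simp only [Bool.and_eq_true, Bool.not_eq_true'] at hcond
        obtain ⟨⟨hnot, hc⟩, hrec⟩ := hcond
        obtain ⟨k, hk, hpair⟩ := (PySem.List.mem_enumerate_iff fs 0 (j, s)).mp hmem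
        have hj : j = (k : Int) := by simpa using congrArg Prod.fst hpair
        have hs : s = fs[k] := congrArg Prod.snd hpair
        subst hj hs
        obtain ⟨sel, hnd, hused, hf⟩ := (ih (PySem.Set.add used (k : Int))).mp hrec
        refine ⟨k :: sel, ?_, ?_, ?_⟩
        · refine List.nodup_cons.mpr ⟨?_, hnd⟩
          intro hin
          exact hused k hin ((PySem.Set.mem_add used _ _).mpr (Or.inr rfl))
        · intro m hm
          rcases List.mem_cons.mp hm with rfl | hm'
          · intro habs
            have hx : used.contains ((m : Int)) = true := by simpa using habs
            rw [hx] at hnot; exact absurd hnot (by simp)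
          · intro habs
            exact hused m hm' ((PySem.Set.mem_add used _ _).mpr (Or.inl habs))
        · refine List.Forall₂.cons ⟨hk, ?_⟩ ?_
          · rwa [List.getD_eq_getElem _ _ hk]
          · refine hf.imp ?_
            intro a b hab; exact hab
      · rintro ⟨sel, hnd, hused, hf⟩
        cases hf with
        | cons hck hfrest =>
            rename_i k sel'
            obtain ⟨hk, hc⟩ := hck
            refine ⟨((k : Int), fs[k]), ?_, ?_⟩
            · exact (PySem.List.mem_enumerate_iff fs 0 _).mpr ⟨k, hk, by simp⟩
            · have hknd := List.nodup_cons.mp hnd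
              simp only [Bool.and_eq_true, Bool.not_eq_true']
              refine ⟨⟨?_, ?_⟩, ?_⟩
              · have := hused k (List.mem_cons_self ..)
                simpa using this
              · rwa [List.getD_eq_getElem _ _ hk] at hc
              · refine (ih (PySem.Set.add used (k : Int))).mpr ⟨sel', hknd.2, ?_, hfrest⟩
                intro m hm habs
                rcases (PySem.Set.mem_add used _ _).mp habs with h | h
                · exact hused m (List.mem_cons_of_mem _ hm) h
                · have : m = k := by exact_mod_cast h
                  exact hknd.1 (this ▸ hm)

theorem mem_numbersA (F : List (List String)) (ds : List String) :
    ds ∈ numbersA F ↔ ∃ c t, c.Sublist (List.range F.length) ∧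
      List.Forall₂ (fun x j => x ∈ F.getD j []) t c ∧ ds.Perm t := by
  unfold numbersA
  simp only [List.mem_mergeSort, List.mem_flatMap, List.mem_range]
  constructor
  · rintro ⟨t, ⟨c, hc, ht⟩, hperm⟩
    obtain ⟨i, hi, hci⟩ := hc
    obtain ⟨hsub, hlen⟩ := (mem_combA i (List.range F.length) c).mp hci
    refine ⟨c, t, by simpa using hsub, ?_, (mem_permutations_iff t ds).mp hperm⟩
    exact List.forall₂_map_right_iff.mp ((mem_prodA _ t).mp ht)
  · rintro ⟨c, t, hsub, hf, hperm⟩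
    have hcl : c.length < F.length + 1 :=
      Nat.lt_succ_of_le (by simpa using hsub.length_le)
    refine ⟨t, ⟨c, ⟨c.length, hcl, (mem_combA _ _ c).mpr ⟨hsub, rfl⟩⟩, ?_⟩,
      (mem_permutations_iff t ds).mpr hperm⟩
    exact (mem_prodA _ t).mpr (List.forall₂_map_right_iff.mpr hf)

theorem forall₂_mem_right {α β : Type} {R : α → β → Prop} :
    ∀ {l₁ : List α} {l₂ : List β}, List.Forall₂ R l₁ l₂ → ∀ b ∈ l₂, ∃ a, R a b := by
  intro l₁ l₂ h
  induction h with
  | nil => simp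
  | cons hab _ ih =>
      intro b hb
      rcases List.mem_cons.mp hb with rfl | hb'
      · exact ⟨_, hab⟩
      · exact ih b hb'

theorem forall₂_and_of_mem {α β : Type} {R : α → β → Prop} {P : β → Prop} :
    ∀ {l₁ : List α} {l₂ : List β}, (∀ b ∈ l₂, P b) → List.Forall₂ R l₁ l₂ →
      List.Forall₂ (fun a b => P b ∧ R a b) l₁ l₂ := by
  intro l₁ l₂ hP h
  induction h with
  | nil => exact List.Forall₂.nil
  | cons hab _ ih =>
      exact List.Forall₂.cons ⟨hP _ (List.mem_cons_self ..), hab⟩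
        (ih (fun b hb => hP b (List.mem_cons_of_mem _ hb)))

-- the heart of the proof: digit tuple reachable by A's enumeration ↔ B's matcher succeeds
theorem key_iff (dice : List (List Int)) (i : Nat) :
    (pyDigits (i : Int) ∈ numbersA (dice.map (fun d => d.map PySem.Int.toStr))) ↔
      matchB (faceSetsB dice) (pyDigits (i : Int)) PySem.Set.empty = true := by
  set F := dice.map (fun d => d.map PySem.Int.toStr) with hF
  set ds := pyDigits (i : Int)
  have hfsF : faceSetsB dice = F.map PySem.Set.ofList := by
    simp [faceSetsB, hF, Function.comp]
  have hlen : (faceSetsB dice).length = F.length := by simp [hfsF]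
  have hpt : ∀ (d : String) (k : Nat), k < F.length →
      (PySem.Set.contains ((faceSetsB dice).getD k PySem.Set.empty) d = true ↔
        d ∈ F.getD k []) := by
    intro d k hk
    rw [hfsF, List.getD_eq_getElem _ _ (by simpa using hk), List.getElem_map]
    simp only [PySem.Set.contains, List.contains_iff_mem, PySem.Set.mem_ofList]
    rw [List.getD_eq_getElem _ _ hk]
  rw [mem_numbersA, matchB_iff]
  constructor
  · rintro ⟨c, t, hsub, hf, hperm⟩
    obtain ⟨sel, hselperm, hfsel⟩ := exists_forall₂_of_perm_left hperm hf
    have hbound : ∀ k ∈ sel, k < F.length := by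
      intro k hk
      have : k ∈ List.range F.length := hsub.subset (hselperm.mem_iff.mp hk)
      simpa using this
    refine ⟨sel, (hselperm.nodup_iff).mpr (hsub.nodup (List.nodup_range)),
      by simp [PySem.Set.empty], ?_⟩
    refine (forall₂_and_of_mem hbound hfsel).imp ?_
    rintro d k ⟨hk, hdk⟩
    exact ⟨hlen ▸ hk, (hpt d k hk).mpr hdk⟩
  · rintro ⟨sel, hnd, _, hfsel⟩
    have hmid : List.Forall₂ (fun d k => d ∈ F.getD k []) ds sel :=
      hfsel.imp (fun d k hdk => (hpt d k (hlen ▸ hdk.1)).mp hdk.2)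
    have hbound : ∀ k ∈ sel, k < F.length := by
      intro k hk
      obtain ⟨d, hd⟩ := forall₂_mem_right hfsel k hk
      exact hlen ▸ hd.1
    have hsubset : sel ⊆ List.range F.length := fun k hk =>
      List.mem_range.mpr (hbound k hk)
    obtain ⟨c, hcperm, hcsub⟩ := hnd.subperm hsubset
    obtain ⟨t, htperm, htf⟩ :=
      exists_forall₂_of_perm_left (R := flip (fun d k => d ∈ F.getD k []))
        (p := c) (q := sel) hcperm (hmid.flip)
    exact ⟨c, t, hcsub, htf.flip, htperm.symm⟩

theorem loops_eq (dice : List (List Int)) (l : List Nat) :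
    loopA (numbersA (dice.map (fun d => d.map PySem.Int.toStr))) l =
      loopB (faceSetsB dice) l := by
  induction l with
  | nil => rfl
  | cons i rest ih =>
      simp only [loopA, loopB]
      by_cases h : matchB (faceSetsB dice) (pyDigits (i : Int)) PySem.Set.empty = true
      · have hmem : pyDigits (i : Int) ∈ numbersA (dice.map (fun d => d.map PySem.Int.toStr)) :=
          (key_iff dice i).mpr h
        simp only [PySem.Set.empty] at h
        simp [hmem, h, ih]
      · have hmem : ¬ pyDigits (i : Int) ∈ numbersA (dice.map (fun d => d.map PySem.Int.toStr)) :=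
          fun hx => h ((key_iff dice i).mp hx)
        simp only [PySem.Set.empty] at h
        simp [hmem, h]

-- ===== VERDICT (by name: the statement is the Claim_ definition above) =====
theorem solution_spec : Claim_equal_solution := by
  intro dice _ _
  unfold Spec_solution solution solution_alt
  exact loops_eq dice (List.range 10000)
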